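-- pv_equiv track=rewrite | github.com/Wang-Benjamin/rag-powered-crm | prelude-leadgen/lemlist/client.py | _get_title_priority
-- ===== SOURCE A (Python) =====
-- def _get_title_priority(title: str) -> int:
--     """Rank title importance — mirrors ApolloClient logic."""
--     if not title:
--         return 0
--     t = title.lower()
--     if any(x in t for x in ["owner", "founder", "ceo", "chief executive", "president"]):
--         return 100
--     if any(x in t for x in ["cfo", "cto", "cmo", "coo", "chief"]):
--         return 90
--     if "vp" in t or "vice president" in t:
--         return 80
--     if "director" in t:
--         return 70
--     if "manager" in t or "head of" in t:
--         return 60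
--     return 50
-- ===== SOURCE B (Python) =====
-- _KEYWORD_PRIORITY = {
--     "owner": 100, "founder": 100, "ceo": 100, "chief executive": 100, "president": 100,
--     "cfo": 90, "cto": 90, "cmo": 90, "coo": 90, "chief": 90,
--     "vp": 80, "vice president": 80,
--     "director": 70,
--     "manager": 60, "head of": 60,
-- }
--
--
-- def _get_title_priority(title: str) -> int:
--     """Rank title importance: the highest priority of any matching keyword.
--
--     Correct because A scans its keyword groups in strictly descending
--     priority order, so its first match is exactly the maximum match.
--     """
--     if not title:
--         return 0
--     t = title.lower()
--     return max((p for k, p in _KEYWORD_PRIORITY.items() if k in t), default=50)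
-- ===== Notes on version B (the rewrite author's own statement) =====
-- stated objective: alternative
-- what changed: Replaced the ordered short-circuit branch chain with an unordered flat keyword-to-priority map and a single max-fold over all matching keywords (valid because A's groups are scanned in strictly descending priority, so first match = maximum match).
import Mathlib
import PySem

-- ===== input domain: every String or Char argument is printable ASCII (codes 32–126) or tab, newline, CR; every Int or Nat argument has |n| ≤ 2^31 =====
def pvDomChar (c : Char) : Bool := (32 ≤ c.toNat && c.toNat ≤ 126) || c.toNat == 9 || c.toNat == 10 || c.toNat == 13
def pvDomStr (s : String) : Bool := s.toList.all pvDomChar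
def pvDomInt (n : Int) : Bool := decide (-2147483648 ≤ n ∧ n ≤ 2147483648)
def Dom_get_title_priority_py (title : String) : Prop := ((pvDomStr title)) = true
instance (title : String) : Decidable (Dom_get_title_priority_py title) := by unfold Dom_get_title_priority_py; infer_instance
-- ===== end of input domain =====

-- B replaces A's ordered short-circuit branch chain by a max-fold over a flat keyword→priority map (objective: alternative).

-- ===== PORT A =====
def get_title_priority_py (title : String) : Int :=
  if title == "" then 0
  else
    if ["owner", "founder", "ceo", "chief executive", "president"].any (fun x => PySem.Str.isIn x (PySem.Str.lower title)) then 100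
    else if ["cfo", "cto", "cmo", "coo", "chief"].any (fun x => PySem.Str.isIn x (PySem.Str.lower title)) then 90
    else if PySem.Str.isIn "vp" (PySem.Str.lower title) || PySem.Str.isIn "vice president" (PySem.Str.lower title) then 80
    else if PySem.Str.isIn "director" (PySem.Str.lower title) then 70
    else if PySem.Str.isIn "manager" (PySem.Str.lower title) || PySem.Str.isIn "head of" (PySem.Str.lower title) then 60
    else 50

-- ===== PORT B =====
def pvKeywordPriority : List (String × Int) :=
  [("owner", 100), ("founder", 100), ("ceo", 100), ("chief executive", 100), ("president", 100),
   ("cfo", 90), ("cto", 90), ("cmo", 90), ("coo", 90), ("chief", 90),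
   ("vp", 80), ("vice president", 80),
   ("director", 70),
   ("manager", 60), ("head of", 60)]

-- max((p for k, p in _KEYWORD_PRIORITY.items() if k in t), default=50)
def get_title_priority_py_alt (title : String) : Int :=
  if title == "" then 0
  else
    (pvKeywordPriority.filter (fun kp => PySem.Str.isIn kp.1 (PySem.Str.lower title))).foldl
      (fun acc kp => max acc kp.2) 50

-- ===== PRECONDITION & SPEC =====
def Spec_get_title_priority_py (title : String) (out : Int) : Prop := out = get_title_priority_py_alt title
instance (title : String) (out : Int) : Decidable (Spec_get_title_priority_py title out) := by unfold Spec_get_title_priority_py; infer_instance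

-- ===== CLAIM (what is proved, stated in full; the proofs are below) =====
def Claim_equal_get_title_priority_py : Prop := ∀ (title : String), Dom_get_title_priority_py title → Spec_get_title_priority_py title (get_title_priority_py title)

-- ===== LEMMAS AND PROOFS =====
-- max-fold over one constant-priority keyword group = "any match" test
theorem pvGrp (q : String → Bool) (l : List String) (v a : Int) :
    ((l.map (fun k => (k, v))).filter (fun kp => q kp.1)).foldl (fun acc kp => max acc kp.2) a
      = if l.any q then max a v else a := by
  induction l generalizing a with
  | nil => simp
  | cons k ls ih =>
    simp only [List.map_cons, List.filter_cons, List.any_cons]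
    by_cases hk : q k = true
    · simp only [hk, if_pos, Bool.true_or, List.foldl_cons, ih]
      by_cases hl : ls.any q = true <;> simp [hl]
    · simp only [Bool.not_eq_true] at hk
      simp [hk, ih]

-- ===== VERDICT (by name: the statement is the Claim_ definition above) =====
theorem get_title_priority_py_spec : Claim_equal_get_title_priority_py := by
  intro title _
  unfold Spec_get_title_priority_py get_title_priority_py get_title_priority_py_alt
  by_cases h : title = ""
  · subst h; rfl
  · have hb : (title == "") = false := beq_eq_false_iff_ne.mpr h
    rw [hb, if_neg Bool.false_ne_true, if_neg Bool.false_ne_true]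
    rw [show pvKeywordPriority
        = (["owner", "founder", "ceo", "chief executive", "president"].map (fun k => (k, (100 : Int))))
          ++ (["cfo", "cto", "cmo", "coo", "chief"].map (fun k => (k, (90 : Int))))
          ++ (["vp", "vice president"].map (fun k => (k, (80 : Int))))
          ++ (["director"].map (fun k => (k, (70 : Int))))
          ++ (["manager", "head of"].map (fun k => (k, (60 : Int)))) from rfl]
    rw [List.filter_append, List.filter_append, List.filter_append, List.filter_append,
        List.foldl_append, List.foldl_append, List.foldl_append, List.foldl_append]
    rw [pvGrp (fun k => PySem.Str.isIn k (PySem.Str.lower title)),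
        pvGrp (fun k => PySem.Str.isIn k (PySem.Str.lower title)),
        pvGrp (fun k => PySem.Str.isIn k (PySem.Str.lower title)),
        pvGrp (fun k => PySem.Str.isIn k (PySem.Str.lower title)),
        pvGrp (fun k => PySem.Str.isIn k (PySem.Str.lower title))]
    simp only [List.any_cons, List.any_nil, Bool.or_false]
    generalize (PySem.Str.isIn "owner" (PySem.Str.lower title) ||
        (PySem.Str.isIn "founder" (PySem.Str.lower title) ||
        (PySem.Str.isIn "ceo" (PySem.Str.lower title) ||
        (PySem.Str.isIn "chief executive" (PySem.Str.lower title) ||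
        PySem.Str.isIn "president" (PySem.Str.lower title))))) = g1
    generalize (PySem.Str.isIn "cfo" (PySem.Str.lower title) ||
        (PySem.Str.isIn "cto" (PySem.Str.lower title) ||
        (PySem.Str.isIn "cmo" (PySem.Str.lower title) ||
        (PySem.Str.isIn "coo" (PySem.Str.lower title) ||
        PySem.Str.isIn "chief" (PySem.Str.lower title))))) = g2
    generalize (PySem.Str.isIn "vp" (PySem.Str.lower title) ||
        PySem.Str.isIn "vice president" (PySem.Str.lower title)) = g3
    generalize (PySem.Str.isIn "director" (PySem.Str.lower title)) = g4
    generalize (PySem.Str.isIn "manager" (PySem.Str.lower title) ||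
        PySem.Str.isIn "head of" (PySem.Str.lower title)) = g5
    cases g1 <;> cases g2 <;> cases g3 <;> cases g4 <;> cases g5 <;> rfl
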